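-- pv_equiv track=rewrite | github.com/chongliujia/ragJ_platform | backend/app/api/api_v1/endpoints/semantic.py | _find_last_json_object
-- ===== SOURCE A (Python) =====
-- from typing import Any, Dict, List, Optional, Literal
--
-- def _find_last_json_object(raw: str) -> Optional[str]:
--     end = raw.rfind("}")
--     if end < 0:
--         return None
--     depth = 0
--     for idx in range(end, -1, -1):
--         ch = raw[idx]
--         if ch == "}":
--             depth += 1
--         elif ch == "{":
--             depth -= 1
--             if depth == 0:
--                 return raw[idx : end + 1]
--     return None
-- ===== SOURCE B (Python) =====
-- def _find_last_json_object(raw):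
--     end = raw.rfind("}")
--     if end < 0:
--         return None
--     stack = []
--     for i, ch in enumerate(raw[:end]):
--         if ch == "{":
--             stack.append(i)
--         elif ch == "}" and stack:
--             stack.pop()
--     if not stack:
--         return None
--     return raw[stack[-1]: end + 1]
-- ===== Notes on version B (the rewrite author's own statement) =====
-- stated objective: alternative
-- what changed: Replaces A's backward scan with a depth counter by a single forward pass that pushes open-brace indices onto a stack (popping each matched close brace); the stack top after the prefix before the last close brace is the match.
import Mathlib
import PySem

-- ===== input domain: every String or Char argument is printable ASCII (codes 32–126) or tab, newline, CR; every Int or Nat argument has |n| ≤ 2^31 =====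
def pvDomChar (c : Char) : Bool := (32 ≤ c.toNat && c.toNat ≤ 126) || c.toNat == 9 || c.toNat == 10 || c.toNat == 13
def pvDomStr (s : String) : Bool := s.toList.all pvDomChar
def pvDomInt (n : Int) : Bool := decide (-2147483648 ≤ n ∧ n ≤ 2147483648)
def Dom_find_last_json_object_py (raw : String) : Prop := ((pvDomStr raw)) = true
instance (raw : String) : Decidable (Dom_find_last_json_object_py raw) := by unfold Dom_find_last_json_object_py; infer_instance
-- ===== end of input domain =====

-- B replaces A's backward depth-counter scan by a forward pass pushing '{' indices on a
-- stack (popping on matched '}'); the stack top after raw[:end] is the match of the last '}'.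

-- ===== PORT A =====
-- A's 'for idx in range(end, -1, -1)' with early return, as a downward structural
-- recursion on idx; s.getD idx ' ' = raw[idx] (idx is always in range here).
def pvLoopA (s : List Char) : Nat → Int → Option Int
  | 0, depth =>
      let ch := s.getD 0 ' '
      if ch = '}' then none
      else if ch = '{' then (if depth - 1 = 0 then some 0 else none)
      else none
  | (i+1), depth =>
      let ch := s.getD (i+1) ' '
      if ch = '}' then pvLoopA s i (depth + 1)
      else if ch = '{' then (if depth - 1 = 0 then some ((i : Int) + 1) else pvLoopA s i (depth - 1))
      else pvLoopA s i depth

def find_last_json_object_py (raw : String) : Option String :=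
  let e := PySem.Str.rfind raw "}"
  if e < 0 then none
  else (pvLoopA raw.toList e.toNat 0).map (fun idx => PySem.Str.slice raw (some idx) (some (e + 1)))

-- ===== PORT B =====
-- the forward loop of Source B over enumerate(raw[:end]): push '{' indices, pop on matched '}'
def pvStackB : List (Int × Char) → List Int → List Int
  | [], st => st
  | (i, ch) :: rest, st =>
      pvStackB rest
        (if ch = '{' then st ++ [i]
         else if ch = '}' ∧ st ≠ [] then st.dropLast else st)

def find_last_json_object_py_alt (raw : String) : Option String :=
  let e := PySem.Str.rfind raw "}"
  if e < 0 then none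
  else
    let st := pvStackB (PySem.List.enumerate (PySem.Str.slice raw none (some e)).toList 0) []
    match st.getLast? with
    | none => none
    | some m => some (PySem.Str.slice raw (some m) (some (e + 1)))

-- ===== PRECONDITION & SPEC =====
def Spec_find_last_json_object_py (raw : String) (out : Option String) : Prop := out = find_last_json_object_py_alt raw
instance (raw : String) (out : Option String) : Decidable (Spec_find_last_json_object_py raw out) := by unfold Spec_find_last_json_object_py; infer_instance

-- ===== CLAIM (what is proved, stated in full; the proofs are below) =====
def Claim_equal_find_last_json_object_py : Prop := ∀ (raw : String), Dom_find_last_json_object_py raw → Spec_find_last_json_object_py raw (find_last_json_object_py raw)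

-- ===== LEMMAS AND PROOFS =====

-- B's stack after processing the first j characters of s
def pvStk (s : List Char) (j : Nat) : List Int :=
  pvStackB (PySem.List.enumerate (s.take j) 0) []

theorem pvStackB_append (l1 l2 : List (Int × Char)) (st : List Int) :
    pvStackB (l1 ++ l2) st = pvStackB l2 (pvStackB l1 st) := by
  induction l1 generalizing st with
  | nil => simp [pvStackB]
  | cons p rest ih => cases p; simp [pvStackB, ih]

theorem pvStk_succ (s : List Char) (j : Nat) (h : j < s.length) :
    pvStk s (j+1) =
      (if s[j] = '{' then pvStk s j ++ [(j : Int)]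
       else if s[j] = '}' ∧ pvStk s j ≠ [] then (pvStk s j).dropLast else pvStk s j) := by
  unfold pvStk
  rw [List.take_add_one, List.getElem?_eq_getElem h]
  rw [show (some s[j]).toList = [s[j]] from rfl]
  rw [PySem.List.enumerate_append, pvStackB_append]
  have hl : (s.take j).length = j := by simp [List.length_take]; omega
  simp [PySem.List.enumerate_cons, PySem.List.enumerate_nil, pvStackB, hl]

theorem reverse_dropLast' (l : List Int) : l.dropLast.reverse = l.reverse.tail := by
  have h : l.reverse.reverse.dropLast = l.reverse.tail.reverse := List.dropLast_reverse
  rw [List.reverse_reverse] at h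
  rw [h, List.reverse_reverse]

theorem pvLoopA_eq_stk (s : List Char) : ∀ (i : Nat) (d : Int), i < s.length → 1 ≤ d →
    pvLoopA s i d = (pvStk s (i+1)).reverse[(d-1).toNat]? := by
  intro i
  induction i with
  | zero =>
    intro d h hd
    have h0 : pvStk s 0 = [] := by simp [pvStk, PySem.List.enumerate_nil, pvStackB]
    rw [pvStk_succ s 0 h, h0]
    by_cases hc : s[0] = '}'
    · have hg : s[0]?.getD ' ' = '}' := by rw [List.getElem?_eq_getElem h, hc]; rfl
      rw [hc]
      simp [pvLoopA, hg]
    · by_cases ho : s[0] = '{'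
      · have hg : s[0]?.getD ' ' = '{' := by rw [List.getElem?_eq_getElem h, ho]; rfl
        rw [ho]
        by_cases hd1 : d - 1 = 0
        · have ht : (d-1).toNat = 0 := by omega
          simp [pvLoopA, hg, hd1]
        · have ht : 1 ≤ (d-1).toNat := by omega
          rw [show pvLoopA s 0 d = none from by simp [pvLoopA, hg, hd1]]
          rw [List.getElem?_eq_none (by simp; omega)]
      · have hg : s[0]?.getD ' ' = s[0] := by rw [List.getElem?_eq_getElem h]; rfl
        rw [if_neg ho, if_neg (by simp [hc])]
        simp [pvLoopA, hg, hc, ho]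
  | succ i ih =>
    intro d h hd
    have hi : i < s.length := by omega
    rw [pvStk_succ s (i+1) h]
    by_cases hc : s[i+1] = '}'
    · have hg : s[i+1]?.getD ' ' = '}' := by rw [List.getElem?_eq_getElem h, hc]; rfl
      rw [show pvLoopA s (i+1) d = pvLoopA s i (d+1) from by simp [pvLoopA, hg],
          ih (d+1) hi (by omega)]
      have e1 : (d + 1 - 1).toNat = (d-1).toNat + 1 := by omega
      rw [if_neg (by simp [hc])]
      by_cases hne : pvStk s (i+1) = []
      · rw [if_neg (by simp [hne])]
        simp [hne]
      · rw [if_pos ⟨hc, hne⟩, reverse_dropLast', List.getElem?_tail, e1]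
    · by_cases ho : s[i+1] = '{'
      · have hg : s[i+1]?.getD ' ' = '{' := by rw [List.getElem?_eq_getElem h, ho]; rfl
        rw [if_pos ho]
        by_cases hd1 : d - 1 = 0
        · have ht : (d-1).toNat = 0 := by omega
          rw [show pvLoopA s (i+1) d = some ((i : Int) + 1) from by simp [pvLoopA, hg, hd1], ht]
          simp
        · have ht : (d-1).toNat = (d-2).toNat + 1 := by omega
          rw [show pvLoopA s (i+1) d = pvLoopA s i (d-1) from by simp [pvLoopA, hg, hd1],
              ih (d-1) hi (by omega)]
          rw [List.reverse_append, ht]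
          simp only [List.reverse_singleton, List.singleton_append, List.getElem?_cons_succ]
          congr 1
          omega
      · have hg : s[i+1]?.getD ' ' = s[i+1] := by rw [List.getElem?_eq_getElem h]; rfl
        rw [if_neg ho, if_neg (by simp [hc])]
        rw [show pvLoopA s (i+1) d = pvLoopA s i d from by simp [pvLoopA, hg, hc, ho],
            ih d hi hd]

-- PySem.Chars.rfind for a one-character needle: nonnegative result points at that character
theorem rfind_go_char (s : List Char) (c : Char) (j : Nat) :
    PySem.Chars.rfind.go s [c] j = -1 ∨
    ∃ k : Nat, PySem.Chars.rfind.go s [c] j = (k : Int) ∧ s[k]? = some c := by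
  induction j with
  | zero =>
    by_cases hp : [c].isPrefixOf s
    · right
      refine ⟨0, ?_, ?_⟩
      · simp [PySem.Chars.rfind.go, hp]
      · rcases (List.isPrefixOf_iff_prefix.mp hp) with ⟨t, ht⟩
        cases s with
        | nil => simp at ht
        | cons a as => simp at ht ⊢; simp [← ht.1]
    · left; simp [PySem.Chars.rfind.go, hp]
  | succ j ih =>
    by_cases hp : [c].isPrefixOf (s.drop (j+1))
    · right
      refine ⟨j+1, ?_, ?_⟩
      · simp [PySem.Chars.rfind.go, hp]
      · rcases (List.isPrefixOf_iff_prefix.mp hp) with ⟨t, ht⟩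
        have : (s.drop (j+1))[0]? = some c := by rw [← ht]; simp
        rw [List.getElem?_drop] at this; simpa using this
    · have : PySem.Chars.rfind.go s [c] (j+1) = PySem.Chars.rfind.go s [c] j := by
        simp [PySem.Chars.rfind.go, hp]
      rw [this]; exact ih

-- ===== VERDICT (by name: the statement is the Claim_ definition above) =====
theorem find_last_json_object_py_spec : Claim_equal_find_last_json_object_py := by
  intro raw _
  unfold Spec_find_last_json_object_py find_last_json_object_py find_last_json_object_py_alt
  simp only [PySem.Str.rfind_eq]
  have hb : ("}" : String).toList = ['}'] := rfl
  rw [hb]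
  set s := raw.toList with hs
  by_cases he : PySem.Chars.rfind s ['}'] < 0
  · simp [he]
  · rw [if_neg he, if_neg he]
    rcases rfind_go_char s '}' s.length with hneg | ⟨k, hk, hkc⟩
    · exact absurd (by rw [PySem.Chars.rfind, hneg]; norm_num) he
    · have hke : PySem.Chars.rfind s ['}'] = (k : Int) := by rw [PySem.Chars.rfind, hk]
      have hkl : k < s.length := (List.getElem?_eq_some_iff.mp hkc).1
      have hkv : s[k] = '}' := by
        have := (List.getElem?_eq_some_iff.mp hkc).2; exact this
      have htoNat : (PySem.Chars.rfind s ['}']).toNat = k := by rw [hke]; simp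
      have hslice : (PySem.Str.slice raw none (some (PySem.Chars.rfind s ['}']))).toList
          = s.take k := by
        rw [hke]
        rw [PySem.Str.toList_slice, PySem.Chars.slice_eq_listSlice, ← hs]
        exact PySem.List.slice_to_natCast s k
      rw [htoNat, hslice]
      have hstk : pvStackB (PySem.List.enumerate (s.take k) 0) [] = pvStk s k := rfl
      rw [hstk]
      cases k with
      | zero =>
        have hg : s[0]?.getD ' ' = '}' := by rw [List.getElem?_eq_getElem hkl, hkv]; rfl
        simp [pvLoopA, hg, pvStk, List.take_zero, PySem.List.enumerate_nil, pvStackB]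
      | succ i =>
        have hg : s[i+1]?.getD ' ' = '}' := by rw [List.getElem?_eq_getElem hkl, hkv]; rfl
        have l1 : pvLoopA s (i+1) 0 = pvLoopA s i 1 := by simp [pvLoopA, hg]
        rw [l1, pvLoopA_eq_stk s i 1 (by omega) le_rfl]
        have h10 : ((1:Int) - 1).toNat = 0 := by norm_num
        rw [h10, ← List.head?_eq_getElem?, List.head?_reverse]
        cases hlast : (pvStk s (i+1)).getLast? with
        | none => simp
        | some m => simp
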